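-- pv_equiv track=rewrite | github.com/webturing/Python3 | 20180107/DoubleColorBall.py | getPrize
-- ===== SOURCE A (Python) =====
-- def getPrize(key, user):
--     red, blue = 0, 0
--     for i in range(6):
--         if key[i] == user[i]:
--             red += 1
--     if key[-1] == user[-1]:
--         blue += 1
--     result = 0
--     if red == 6 and blue == 1:  # 6+1
--         result = 1
--     elif red == 6 and blue == 0:  # 6+0
--         result = 2
--     elif red == 5 and blue == 1:
--         result = 3
--     elif red + blue == 5:
--         result = 4
--     elif red + blue == 4:
--         result = 5
--     elif blue == 1:
--         result = 6
--     return (red, blue, result)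
-- ===== SOURCE B (Python) =====
-- def _count_eq(pairs):
--     if not pairs:
--         return 0
--     a, b = pairs[0]
--     return (1 if a == b else 0) + _count_eq(pairs[1:])
--
--
-- def getPrize(key, user):
--     red = _count_eq([(key[i], user[i]) for i in range(6)])
--     blue = 1 if key[-1] == user[-1] else 0
--     tiers = ((0, 0, 0, 0, 5, 4, 2), (6, 6, 6, 5, 4, 3, 1))
--     return (red, blue, tiers[blue][red])
-- ===== Notes on version B (the rewrite author's own statement) =====
-- stated objective: alternative
-- what changed: counts red by structural recursion over the list of six (key[i], user[i]) pairs instead of an accumulator loop over range(6), and computes the tier by indexing a per-blue row of precomputed tiers (tiers[blue][red]) instead of the if/elif cascade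
import Mathlib
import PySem

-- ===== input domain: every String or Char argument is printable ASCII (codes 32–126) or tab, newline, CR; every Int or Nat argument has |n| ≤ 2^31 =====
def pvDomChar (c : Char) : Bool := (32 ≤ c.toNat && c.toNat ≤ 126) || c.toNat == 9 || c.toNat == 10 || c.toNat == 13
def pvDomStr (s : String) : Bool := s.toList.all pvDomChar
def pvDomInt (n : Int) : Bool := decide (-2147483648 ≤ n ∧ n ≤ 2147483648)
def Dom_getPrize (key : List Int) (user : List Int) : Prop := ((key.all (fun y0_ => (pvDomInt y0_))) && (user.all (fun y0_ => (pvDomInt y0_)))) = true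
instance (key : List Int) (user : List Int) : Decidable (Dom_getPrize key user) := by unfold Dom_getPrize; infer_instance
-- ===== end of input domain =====

-- B counts red by structural recursion over the list of six (key[i], user[i]) pairs and reads the tier from a per-blue row (tiers[blue][red]) instead of A's range(6) accumulator loop and if/elif cascade; objective: alternative.


-- ===== PORT A =====
def getPrize (key : List Int) (user : List Int) : Int × Int × Int :=
  let red : Int := (PySem.List.pyRange 0 6 1).foldl
    (fun r i => if PySem.List.pyGetD key i 0 = PySem.List.pyGetD user i 0 then r + 1 else r) 0
  let blue : Int :=
    if PySem.List.pyGetD key (-1) 0 = PySem.List.pyGetD user (-1) 0 then 0 + 1 else 0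
  let result : Int :=
    if red = 6 ∧ blue = 1 then 1
    else if red = 6 ∧ blue = 0 then 2
    else if red = 5 ∧ blue = 1 then 3
    else if red + blue = 5 then 4
    else if red + blue = 4 then 5
    else if blue = 1 then 6
    else 0
  (red, blue, result)

-- ===== PORT B =====
-- _count_eq: structural recursion over the pair list (pairs[0], pairs[1:]).
def countEq : List (Int × Int) → Int
  | [] => 0
  | (a, b) :: rest => (if a = b then 1 else 0) + countEq rest

def getPrize_alt (key : List Int) (user : List Int) : Int × Int × Int :=
  let red : Int := countEq ((PySem.List.pyRange 0 6 1).map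
    (fun i => (PySem.List.pyGetD key i 0, PySem.List.pyGetD user i 0)))
  let blue : Int := if PySem.List.pyGetD key (-1) 0 = PySem.List.pyGetD user (-1) 0 then 1 else 0
  let tiers : List (List Int) := [[0, 0, 0, 0, 5, 4, 2], [6, 6, 6, 5, 4, 3, 1]]
  -- tiers[blue][red]: blue ∈ {0,1} and 0 ≤ red ≤ 6 always, so the Python indexing never raises;
  -- ported with in-range defaults.
  (red, blue, PySem.List.pyGetD (PySem.List.pyGetD tiers blue []) red 0)

-- ===== PRECONDITION & SPEC =====
-- Pre_: the Python A indexes key[0..5] and user[0..5], so it raises IndexError unless both lists have length ≥ 6.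
def Pre_getPrize (key : List Int) (user : List Int) : Prop :=
  6 ≤ key.length ∧ 6 ≤ user.length
instance (key : List Int) (user : List Int) : Decidable (Pre_getPrize key user) := by
  unfold Pre_getPrize; infer_instance

def pvWitness_getPrize : List Int × List Int := ([1, 2, 3, 4, 5, 6, 7], [1, 2, 3, 9, 5, 6, 7])

def Spec_getPrize (key : List Int) (user : List Int) (out : Int × Int × Int) : Prop := out = getPrize_alt key user
instance (key : List Int) (user : List Int) (out : Int × Int × Int) : Decidable (Spec_getPrize key user out) := by unfold Spec_getPrize; infer_instance

-- ===== CLAIM =====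
def Claim_equal_getPrize : Prop := ∀ (key : List Int) (user : List Int), Dom_getPrize key user → Pre_getPrize key user → Spec_getPrize key user (getPrize key user)

-- ===== LEMMAS AND PROOFS =====

-- A's range(6) loop computes the sum of the six per-position match indicators.
theorem redA_eq (a1 a2 a3 a4 a5 a6 : Int) (kt : List Int) (b1 b2 b3 b4 b5 b6 : Int) (ut : List Int) :
    (PySem.List.pyRange 0 6 1).foldl
      (fun r i => if PySem.List.pyGetD (a1 :: a2 :: a3 :: a4 :: a5 :: a6 :: kt) i 0 = PySem.List.pyGetD (b1 :: b2 :: b3 :: b4 :: b5 :: b6 :: ut) i 0 then r + 1 else r) (0:Int)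
    = ((if a1 = b1 then 1 else 0) + (if a2 = b2 then 1 else 0) + (if a3 = b3 then 1 else 0)
      + (if a4 = b4 then 1 else 0) + (if a5 = b5 then 1 else 0) + (if a6 = b6 then 1 else 0)) := by
  have hr : PySem.List.pyRange 0 6 1 = [0, 1, 2, 3, 4, 5] := by decide
  rw [hr]
  simp only [List.foldl, PySem.List.pyGetD_ofNat', List.getD,
    List.getElem?_cons_succ, List.getElem?_cons_zero, Option.getD_some]
  split_ifs <;> omega

-- B's recursion over the six built pairs computes the same sum of indicators.
theorem redB_eq (a1 a2 a3 a4 a5 a6 : Int) (kt : List Int) (b1 b2 b3 b4 b5 b6 : Int) (ut : List Int) :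
    countEq ((PySem.List.pyRange 0 6 1).map
      (fun i => (PySem.List.pyGetD (a1 :: a2 :: a3 :: a4 :: a5 :: a6 :: kt) i 0,
                 PySem.List.pyGetD (b1 :: b2 :: b3 :: b4 :: b5 :: b6 :: ut) i 0)))
    = ((if a1 = b1 then 1 else 0) + (if a2 = b2 then 1 else 0) + (if a3 = b3 then 1 else 0)
      + (if a4 = b4 then 1 else 0) + (if a5 = b5 then 1 else 0) + (if a6 = b6 then 1 else 0)) := by
  have hr : PySem.List.pyRange 0 6 1 = [0, 1, 2, 3, 4, 5] := by decide
  rw [hr]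
  simp only [List.map, countEq, PySem.List.pyGetD_ofNat', List.getD,
    List.getElem?_cons_succ, List.getElem?_cons_zero, Option.getD_some]
  split_ifs <;> omega

-- A's if/elif cascade agrees with B's per-blue tier rows on every reachable (red, blue) pair.
theorem table_eq (red blue : Int) (h0 : 0 ≤ red) (h6 : red ≤ 6) (hb : blue = 0 ∨ blue = 1) :
    (if red = 6 ∧ blue = 1 then (1:Int)
     else if red = 6 ∧ blue = 0 then 2
     else if red = 5 ∧ blue = 1 then 3
     else if red + blue = 5 then 4
     else if red + blue = 4 then 5
     else if blue = 1 then 6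
     else 0)
    = PySem.List.pyGetD (PySem.List.pyGetD
        [[(0:Int), 0, 0, 0, 5, 4, 2], [6, 6, 6, 5, 4, 3, 1]] blue []) red 0 := by
  interval_cases red <;> rcases hb with rfl | rfl <;> decide

-- ===== VERDICT =====
set_option maxHeartbeats 1000000 in
theorem getPrize_spec : Claim_equal_getPrize := by
  intro key user _ hpre
  obtain ⟨hk, hu⟩ := hpre
  obtain ⟨a1, a2, a3, a4, a5, a6, kt, rfl⟩ :
      ∃ a1 a2 a3 a4 a5 a6 kt, key = a1 :: a2 :: a3 :: a4 :: a5 :: a6 :: kt := by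
    match key, hk with
    | a1 :: a2 :: a3 :: a4 :: a5 :: a6 :: kt, _ => exact ⟨a1, a2, a3, a4, a5, a6, kt, rfl⟩
  obtain ⟨b1, b2, b3, b4, b5, b6, ut, rfl⟩ :
      ∃ b1 b2 b3 b4 b5 b6 ut, user = b1 :: b2 :: b3 :: b4 :: b5 :: b6 :: ut := by
    match user, hu with
    | b1 :: b2 :: b3 :: b4 :: b5 :: b6 :: ut, _ => exact ⟨b1, b2, b3, b4, b5, b6, ut, rfl⟩
  show _ = getPrize_alt _ _
  simp only [getPrize, getPrize_alt, redA_eq, redB_eq, zero_add]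
  rw [← table_eq]
  · split_ifs <;> omega
  · split_ifs <;> omega
  · split_ifs <;> simp
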